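-- pv_equiv track=rewrite | github.com/abhishekparve/Leet-Code | Stack and Queues/Infix-Postfix-Prefix-problems/Infix_to_Prefix.py | reverse_and_swap_brackets
-- ===== SOURCE A (Python) =====
-- def reverse_and_swap_brackets(s):
--     l = 0
--     r = len(s) - 1
--     s = [ch for ch in s]
--     while l <= r:
--         while l <= r:
--             if s[l] == "(":
--                 s[l] = ")"
--             elif s[l] == ")":
--                 s[l] = "("
--
--             if s[r] == "(":
--                 s[r] = ")"
--             elif s[r] == ")":
--                 s[r] = "("
--
--             # swap
--             s[l], s[r] = s[r], s[l]
--             l += 1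
--             r -= 1
--     return "".join(s)
-- ===== SOURCE B (Python) =====
-- _SWAP = str.maketrans('()', ')(')
--
-- def reverse_and_swap_brackets(s):
--     return s.translate(_SWAP)[::-1]
-- ===== Notes on version B (the rewrite author's own statement) =====
-- stated objective: faster
-- what changed: Replaces the two-pointer in-place end-swapping loop with a translate-table pass followed by a slice reversal (map each character through a bracket-swap table, then reverse).
-- intended difference: On odd-length strings whose middle character is a parenthesis, A flips that character twice (back to itself) and returns it unswapped, while B swaps it; swapping every bracket is the intended behaviour of reverse-and-swap-brackets. — e.g. on reverse_and_swap_brackets("("): A returns "(", B returns ")"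
import Mathlib
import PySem

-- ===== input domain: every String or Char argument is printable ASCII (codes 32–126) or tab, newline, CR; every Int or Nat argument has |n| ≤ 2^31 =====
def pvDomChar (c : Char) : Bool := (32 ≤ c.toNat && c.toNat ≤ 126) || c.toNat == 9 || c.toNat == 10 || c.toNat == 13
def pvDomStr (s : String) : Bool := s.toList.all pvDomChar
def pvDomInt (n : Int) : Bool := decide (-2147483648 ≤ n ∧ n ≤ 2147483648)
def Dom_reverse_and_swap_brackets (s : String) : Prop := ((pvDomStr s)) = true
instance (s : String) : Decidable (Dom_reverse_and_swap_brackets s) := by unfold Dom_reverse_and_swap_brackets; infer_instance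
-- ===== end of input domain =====

-- B replaces A's two-pointer in-place end-swapping loop by a per-character bracket-swap
-- translation followed by a reversal (measured faster by a constant factor). Intended
-- difference (D_ below): on odd-length strings with a parenthesis dead-center, A flips
-- that character twice and leaves it unswapped; B swaps it.

-- ===== PORT A =====
-- the two `if`-chains of A's loop body, applied to s[l] and to s[r]
def pvFlip (c : Char) : Char := if c = '(' then ')' else if c = ')' then '(' else c

-- one iteration of A's loop body on the mutable list: flip s[li], flip s[ri], swap them
def pvIter (cs : List Char) (li ri : Nat) : List Char :=
  let cs1 := cs.set li (pvFlip (cs.getD li ' '))      -- if s[l] == "(" … elif …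
  let cs2 := cs1.set ri (pvFlip (cs1.getD ri ' '))    -- if s[r] == "(" … elif …
  let a := cs2.getD li ' '
  let b := cs2.getD ri ' '
  (cs2.set li b).set ri a                             -- s[l], s[r] = s[r], s[l]

-- A's `while l <= r` loop (the nested identical inner `while` runs until l > r, so the
-- outer loop makes exactly one round of it); fuel bounds the iteration count, the guard
-- `l ≤ r` is the real loop condition.
def pvLoopA : Nat → List Char → Int → Int → List Char
  | 0, cs, _, _ => cs
  | fuel+1, cs, l, r =>
    if l ≤ r then pvLoopA fuel (pvIter cs l.toNat r.toNat) (l+1) (r-1) else cs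

def reverse_and_swap_brackets (s : String) : String :=
  String.ofList (pvLoopA s.toList.length s.toList 0 ((s.toList.length : Int) - 1))

-- ===== PORT B =====
-- str.maketrans('()', ')(')
def pvTable : List (Char × Char) := [('(', ')'), (')', '(')]
-- the table lookup str.translate performs for one character
def pvTranslate (c : Char) : Char := (pvTable.lookup c).getD c
-- s.translate(_SWAP)[::-1]
def reverse_and_swap_brackets_alt (s : String) : String :=
  String.ofList ((s.toList.map pvTranslate).reverse)

-- ===== PRECONDITION & SPEC =====
-- On odd-length strings whose middle character is a parenthesis, A returns it unswapped
-- (its l = r iteration flips it twice), while B swaps it; swapping every bracket is the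
-- intended behaviour of reverse-and-swap-brackets.
def D_reverse_and_swap_brackets (s : String) : Prop :=
  s.toList.length % 2 = 1 ∧
    (s.toList.getD (s.toList.length / 2) ' ' = '(' ∨
      s.toList.getD (s.toList.length / 2) ' ' = ')')
instance (s : String) : Decidable (D_reverse_and_swap_brackets s) := by
  unfold D_reverse_and_swap_brackets; infer_instance

def Spec_reverse_and_swap_brackets (s : String) (out : String) : Prop :=
  ¬ D_reverse_and_swap_brackets s → out = reverse_and_swap_brackets_alt s
instance (s : String) (out : String) : Decidable (Spec_reverse_and_swap_brackets s out) := by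
  unfold Spec_reverse_and_swap_brackets; infer_instance

def pvDiffWitness_reverse_and_swap_brackets : String := "("
def pvDiffWitnessOut_reverse_and_swap_brackets : String × String := ("(", ")")

-- ===== CLAIM (what is proved, stated in full; the proofs are below) =====
def Claim_unchanged_reverse_and_swap_brackets : Prop := ∀ (s : String), Dom_reverse_and_swap_brackets s → Spec_reverse_and_swap_brackets s (reverse_and_swap_brackets s)
def Claim_changed_reverse_and_swap_brackets : Prop := Dom_reverse_and_swap_brackets (pvDiffWitness_reverse_and_swap_brackets) ∧ D_reverse_and_swap_brackets (pvDiffWitness_reverse_and_swap_brackets) ∧ reverse_and_swap_brackets (pvDiffWitness_reverse_and_swap_brackets) = pvDiffWitnessOut_reverse_and_swap_brackets.1 ∧ reverse_and_swap_brackets_alt (pvDiffWitness_reverse_and_swap_brackets) = pvDiffWitnessOut_reverse_and_swap_brackets.2 ∧ pvDiffWitnessOut_reverse_and_swap_brackets.1 ≠ pvDiffWitnessOut_reverse_and_swap_brackets.2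
def Claim_exact_reverse_and_swap_brackets : Prop := ∀ (s : String), Dom_reverse_and_swap_brackets s → D_reverse_and_swap_brackets s → reverse_and_swap_brackets s ≠ reverse_and_swap_brackets_alt s

-- ===== LEMMAS AND PROOFS =====

theorem pvFlip_flip (c : Char) : pvFlip (pvFlip c) = c := by
  unfold pvFlip; split_ifs <;> simp_all

theorem pvTranslate_eq_flip (c : Char) : pvTranslate c = pvFlip c := by
  by_cases h1 : c = '(' <;> by_cases h2 : c = ')' <;>
    simp_all [pvTranslate, pvTable, pvFlip, List.lookup, beq_eq_false_iff_ne.mpr]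

-- the value A's loop leaves at position i after processing the segment [l, r]
def pvTgt (cs : List Char) (l r i : Nat) : Char :=
  if i < l ∨ r < i then cs.getD i ' '
  else if i + i = l + r then cs.getD i ' '
  else pvFlip (cs.getD (l + r - i) ' ')

theorem getD_set (cs : List Char) (i j : Nat) (a : Char) :
    (cs.set i a).getD j ' ' = if i = j ∧ i < cs.length then a else cs.getD j ' ' := by
  rcases Nat.lt_or_ge j cs.length with h | h
  · by_cases hij : i = j <;> by_cases hi : i < cs.length <;>
      simp_all [List.getD_eq_getElem?_getD]
  · have hno : ¬ (i = j ∧ i < cs.length) := by omega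
    simp [hno, List.getD_eq_getElem?_getD, h]

theorem pvIter_length (cs : List Char) (li ri : Nat) :
    (pvIter cs li ri).length = cs.length := by simp [pvIter]

set_option maxRecDepth 4000 in
theorem pvIter_getD_lt (cs : List Char) (l r i : Nat) (hlr : l < r) (hr : r < cs.length) :
    (pvIter cs l r).getD i ' ' =
      if i = l then pvFlip (cs.getD r ' ')
      else if i = r then pvFlip (cs.getD l ' ')
      else cs.getD i ' ' := by
  simp only [pvIter, getD_set, List.length_set]
  split_ifs <;> first | rfl | omega | (exfalso; simp only [true_and] at *; omega)

theorem pvIter_getD_eq (cs : List Char) (l i : Nat) (hl : l < cs.length) :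
    (pvIter cs l l).getD i ' ' = cs.getD i ' ' := by
  simp only [pvIter, getD_set, List.length_set]
  split_ifs <;> first | rfl | omega | simp_all [pvFlip_flip]

theorem pvTgt_iter (cs : List Char) (l r : Nat) (hlt : l < r) (hr : r < cs.length) (i : Nat) :
    pvTgt (pvIter cs l r) (l + 1) (r - 1) i = pvTgt cs l r i := by
  unfold pvTgt
  simp only [pvIter_getD_lt _ _ _ _ hlt hr]
  split_ifs <;>
    first | rfl | omega | (congr 1; omega) | (congr 2; omega)

theorem pvLoopA_stop (fuel : Nat) (cs : List Char) (l r : Int) (h : ¬ l ≤ r) :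
    pvLoopA fuel cs l r = cs := by cases fuel <;> simp [pvLoopA, h]

theorem pvLoopA_spec : ∀ (fuel : Nat) (cs : List Char) (l r k : Nat),
    l + k = r + 1 → r < cs.length → k ≤ 2 * fuel →
    (pvLoopA fuel cs (l : Int) (r : Int)).length = cs.length ∧
      ∀ i, (pvLoopA fuel cs (l : Int) (r : Int)).getD i ' ' = pvTgt cs l r i := by
  intro fuel
  induction fuel with
  | zero =>
    intro cs l r k hk hr hf
    refine ⟨rfl, fun i => ?_⟩
    simp only [pvLoopA, pvTgt]
    rw [if_pos (by omega)]
  | succ fuel ih =>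
    intro cs l r k hk hr hf
    by_cases hlr : l ≤ r
    · have hguard : (l : Int) ≤ (r : Int) := by exact_mod_cast hlr
      simp only [pvLoopA, if_pos hguard, Int.toNat_natCast]
      by_cases heq : l = r
      · subst heq
        rw [pvLoopA_stop _ _ _ _ (by omega)]
        refine ⟨pvIter_length _ _ _, fun i => ?_⟩
        rw [pvIter_getD_eq _ _ _ (by omega)]
        unfold pvTgt
        split_ifs <;> first | rfl | omega
      · have hlt : l < r := by omega
        have hcast1 : (l : Int) + 1 = ((l + 1 : Nat) : Int) := by push_cast; ring
        have hcast2 : (r : Int) - 1 = ((r - 1 : Nat) : Int) := by omega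
        rw [hcast1, hcast2]
        obtain ⟨ihlen, ihval⟩ := ih (pvIter cs l r) (l+1) (r-1) (k-2) (by omega)
          (by rw [pvIter_length]; omega) (by omega)
        refine ⟨by rw [ihlen, pvIter_length], fun i => ?_⟩
        rw [ihval i, pvTgt_iter _ _ _ hlt hr]
    · have hng : ¬ ((l : Int) ≤ (r : Int)) := by exact_mod_cast hlr
      rw [pvLoopA_stop _ _ _ _ hng]
      refine ⟨rfl, fun i => ?_⟩
      unfold pvTgt
      rw [if_pos (by omega)]

theorem alt_getD (cs : List Char) (i : Nat) (hi : i < cs.length) :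
    ((cs.map pvTranslate).reverse).getD i ' ' = pvFlip (cs.getD (cs.length - 1 - i) ' ') := by
  have h1 : i < ((cs.map pvTranslate).reverse).length := by simpa using hi
  have h2 : cs.length - 1 - i < cs.length := by omega
  rw [List.getD_eq_getElem _ _ h1, List.getD_eq_getElem _ _ h2]
  simp [List.getElem_reverse, pvTranslate_eq_flip]

theorem main_pointwise (s : String) (hD : ¬ D_reverse_and_swap_brackets s)
    (hn : 0 < s.toList.length) (i : Nat) (hi : i < s.toList.length) :
    pvTgt s.toList 0 (s.toList.length - 1) i =
      pvFlip (s.toList.getD (s.toList.length - 1 - i) ' ') := by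
  unfold pvTgt
  rw [if_neg (by omega)]
  by_cases h2 : i + i = 0 + (s.toList.length - 1)
  · rw [if_pos h2]
    unfold D_reverse_and_swap_brackets at hD
    push Not at hD
    have hmid : s.toList.length / 2 = i := by omega
    have hpar := hD (by omega)
    rw [hmid] at hpar
    have hidx : s.toList.length - 1 - i = i := by omega
    rw [hidx]
    unfold pvFlip
    rw [if_neg hpar.1, if_neg hpar.2]
  · rw [if_neg h2]
    congr 2
    omega

theorem data_mk_inj (l1 l2 : List Char) (h : String.ofList l1 = String.ofList l2) : l1 = l2 := by
  have h2 := congrArg String.toList h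
  rwa [String.toList_ofList, String.toList_ofList] at h2

-- ===== VERDICT (by name: the statement is the Claim_ definition above) =====
theorem reverse_and_swap_brackets_spec : Claim_unchanged_reverse_and_swap_brackets := by
  intro s _
  unfold Spec_reverse_and_swap_brackets
  intro hD
  unfold reverse_and_swap_brackets reverse_and_swap_brackets_alt
  rcases Nat.eq_zero_or_pos s.toList.length with hn | hn
  · rw [List.length_eq_zero_iff.mp hn]
    rfl
  · have hcast : ((s.toList.length : Int) - 1) = (((s.toList.length - 1 : Nat)) : Int) := by
      omega
    have hz : (0 : Int) = ((0 : Nat) : Int) := rfl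
    rw [hcast, hz]
    obtain ⟨hlen, hval⟩ := pvLoopA_spec s.toList.length s.toList 0 (s.toList.length - 1)
      s.toList.length (by omega) (by omega) (by omega)
    have hlen2 : ((s.toList.map pvTranslate).reverse).length = s.toList.length := by
      rw [List.length_reverse, List.length_map]
    congr 1
    apply List.ext_getElem (by rw [hlen, hlen2])
    intro i hi1 hi2
    have hi : i < s.toList.length := by omega
    rw [← List.getD_eq_getElem _ ' ' hi1, ← List.getD_eq_getElem _ ' ' hi2,
        hval i, alt_getD _ _ hi, main_pointwise s hD hn i hi]

theorem reverse_and_swap_brackets_changed : Claim_changed_reverse_and_swap_brackets := by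
  unfold Claim_changed_reverse_and_swap_brackets; decide

theorem reverse_and_swap_brackets_tight : Claim_exact_reverse_and_swap_brackets := by
  intro s _ hD heq
  obtain ⟨hodd, hpar⟩ := hD
  have hn : 0 < s.toList.length := by omega
  unfold reverse_and_swap_brackets reverse_and_swap_brackets_alt at heq
  have hcast : ((s.toList.length : Int) - 1) = (((s.toList.length - 1 : Nat)) : Int) := by
    omega
  have hz : (0 : Int) = ((0 : Nat) : Int) := rfl
  rw [hcast, hz] at heq
  have hlists := data_mk_inj _ _ heq
  obtain ⟨hlen, hval⟩ := pvLoopA_spec s.toList.length s.toList 0 (s.toList.length - 1)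
    s.toList.length (by omega) (by omega) (by omega)
  have hm : s.toList.length / 2 < s.toList.length := by omega
  have hgd := congrArg (fun l => l.getD (s.toList.length / 2) ' ') hlists
  simp only at hgd
  rw [hval, alt_getD _ _ hm] at hgd
  have hidx : s.toList.length - 1 - s.toList.length / 2 = s.toList.length / 2 := by omega
  rw [hidx] at hgd
  unfold pvTgt at hgd
  rw [if_neg (by omega), if_pos (by omega)] at hgd
  rcases hpar with h | h <;> rw [h] at hgd <;> simp [pvFlip] at hgd
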